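-- pv_equiv track=rewrite | github.com/noyo12394/Cat-411-Project-Northridge-Bridge | scripts/run_ml_hybrid_analysis.py | source_feature_from_encoded
-- ===== SOURCE A (Python) =====
-- def source_feature_from_encoded(name: str, categorical_features: list[str]) -> str:
--     if name.startswith('num__'):
--         return name.split('__', 1)[1]
--     if name.startswith('cat__'):
--         remainder = name.split('__', 1)[1]
--         for feature in sorted(categorical_features, key=len, reverse=True):
--             prefix = feature + '_'
--             if remainder == feature or remainder.startswith(prefix):
--                 return feature
--         return remainder
--     return name
-- ===== SOURCE B (Python) =====
-- def source_feature_from_encoded(name: str, categorical_features: list[str]) -> str: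
--     if name.startswith('num__'):
--         return name[5:]
--     if not name.startswith('cat__'):
--         return name
--     remainder = name[5:]
--     best = None
--     for feature in categorical_features:
--         if remainder == feature or remainder.startswith(feature + '_'):
--             if best is None or len(feature) > len(best):
--                 best = feature
--     return remainder if best is None else best
-- ===== Notes on version B (the rewrite author's own statement) =====
-- stated objective: alternative
-- what changed: B replaces A's sort of the feature list by length (then first-match scan) with a single unsorted pass that keeps the longest matching feature, and replaces split('__',1)[1] with name[5:].
import Mathlib
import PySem

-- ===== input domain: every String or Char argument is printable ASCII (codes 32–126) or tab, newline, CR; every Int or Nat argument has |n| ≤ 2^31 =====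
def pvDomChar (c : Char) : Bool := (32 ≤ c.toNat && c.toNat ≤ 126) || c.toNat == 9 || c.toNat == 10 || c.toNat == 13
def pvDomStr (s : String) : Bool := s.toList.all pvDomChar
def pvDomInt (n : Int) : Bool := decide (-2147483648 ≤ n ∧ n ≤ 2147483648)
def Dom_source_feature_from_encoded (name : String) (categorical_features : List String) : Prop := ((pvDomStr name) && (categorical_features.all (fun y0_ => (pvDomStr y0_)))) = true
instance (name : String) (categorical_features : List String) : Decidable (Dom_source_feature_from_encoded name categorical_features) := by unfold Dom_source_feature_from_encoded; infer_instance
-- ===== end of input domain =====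

-- B replaces A's sort-then-scan (sorted(categorical_features, key=len, reverse=True), return first match)
-- by a single linear pass keeping the longest matching feature; same return value, no mutation.

-- ===== PORT A =====
-- name.split('__', 1)[1]; the [1] access always succeeds where this helper is used
-- (name starts with 'num__' or 'cat__', so a '__' split happened), hence .getD is never taken.
def pyTailA (name : String) : String :=
  (PySem.List.pyGet? ((PySem.Str.splitMax? name "__" 1).getD []) 1).getD ""

-- the 'for feature in sorted(...)' loop with its early return
def loopA (remainder : String) : List String → Option String
  | [] => none
  | feature :: rest =>
    let prefixS := feature ++ "_"
    if remainder == feature || PySem.Str.startswith remainder prefixS then some feature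
    else loopA remainder rest

def source_feature_from_encoded (name : String) (categorical_features : List String) : String :=
  if PySem.Str.startswith name "num__" then pyTailA name
  else if PySem.Str.startswith name "cat__" then
    let remainder := pyTailA name
    match loopA remainder (PySem.List.sorted categorical_features (fun f => PySem.Str.len f) true) with
    | some feature => feature
    | none => remainder
  else name

-- ===== PORT B =====
-- body of B's single for-loop: keep the longest matching feature seen so far
def stepB (remainder : String) (best : Option String) (feature : String) : Option String :=
  if remainder == feature || PySem.Str.startswith remainder (feature ++ "_") then
    match best with
    | none => some feature
    | some b => if PySem.Str.len b < PySem.Str.len feature then some feature else best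
  else best

def source_feature_from_encoded_alt (name : String) (categorical_features : List String) : String :=
  if PySem.Str.startswith name "num__" then PySem.Str.slice name (some 5) none
  else if !PySem.Str.startswith name "cat__" then name
  else
    let remainder := PySem.Str.slice name (some 5) none
    match categorical_features.foldl (stepB remainder) none with
    | none => remainder
    | some best => best

-- ===== PRECONDITION & SPEC =====
def Spec_source_feature_from_encoded (name : String) (categorical_features : List String) (out : String) : Prop := out = source_feature_from_encoded_alt name categorical_features
instance (name : String) (categorical_features : List String) (out : String) : Decidable (Spec_source_feature_from_encoded name categorical_features out) := by unfold Spec_source_feature_from_encoded; infer_instance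

-- ===== CLAIM (what is proved, stated in full; the proofs are below) =====
def Claim_equal_source_feature_from_encoded : Prop := ∀ (name : String) (categorical_features : List String), Dom_source_feature_from_encoded name categorical_features → Spec_source_feature_from_encoded name categorical_features (source_feature_from_encoded name categorical_features)

-- ===== LEMMAS AND PROOFS =====

-- 'remainder matches feature' — the test both loops make
def Mtch (r f : String) : Bool := r == f || PySem.Str.startswith r (f ++ "_")

theorem loopA_cons (r f : String) (t : List String) :
    loopA r (f :: t) = if Mtch r f then some f else loopA r t := rfl

theorem stepB_eq (r : String) (b : Option String) (f : String) :
    stepB r b f = if Mtch r f then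
      (match b with
       | none => some f
       | some b' => if PySem.Str.len b' < PySem.Str.len f then some f else b)
    else b := rfl

theorem mtch_prefix {r f : String} (h : Mtch r f = true) : f.toList <+: r.toList := by
  rcases Bool.or_eq_true_iff.mp h with h | h
  · rw [show r = f from beq_iff_eq.mp h]
  · rw [PySem.Str.startswith_eq, PySem.Chars.startswith_iff, String.toList_append] at h
    exact (List.prefix_append f.toList "_".toList).trans h

theorem mtch_uniq {r f g : String} (hf : Mtch r f = true) (hg : Mtch r g = true)
    (hlen : PySem.Str.len f = PySem.Str.len g) : f = g := by
  have hl : f.toList.length = g.toList.length := by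
    rw [PySem.Str.len_eq, PySem.Str.len_eq] at hlen; exact_mod_cast hlen
  exact String.toList_inj.mp
    ((List.prefix_of_prefix_length_le (mtch_prefix hf) (mtch_prefix hg) hl.le).eq_of_length hl)

-- the value both loops must compute: none if nothing matches, else a matching feature of maximal length
def Good (r : String) (cats : List String) (res : Option String) : Prop :=
  (res = none ∧ ∀ g ∈ cats, Mtch r g = false) ∨
  (∃ m, res = some m ∧ m ∈ cats ∧ Mtch r m = true ∧
    ∀ g ∈ cats, Mtch r g = true → PySem.Str.len g ≤ PySem.Str.len m)

theorem good_uniq {r : String} {cats : List String} {x y : Option String}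
    (hx : Good r cats x) (hy : Good r cats y) : x = y := by
  rcases hx with ⟨hx, hnx⟩ | ⟨m, hx, hmem, hm, hmax⟩
  · rcases hy with ⟨hy, _⟩ | ⟨m, hy, hmem, hm, _⟩
    · rw [hx, hy]
    · exact absurd hm (by simp [hnx m hmem])
  · rcases hy with ⟨hy, hny⟩ | ⟨m', hy, hmem', hm', hmax'⟩
    · exact absurd hm (by simp [hny m hmem])
    · rw [hx, hy, mtch_uniq hm hm' (le_antisymm (hmax' m hmem hm) (hmax m' hmem' hm'))]

theorem loopA_good (r : String) (l : List String)
    (hp : l.Pairwise (fun a b => PySem.Str.len b ≤ PySem.Str.len a)) :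
    Good r l (loopA r l) := by
  induction l with
  | nil => exact Or.inl ⟨rfl, by simp⟩
  | cons f t ih =>
    rw [List.pairwise_cons] at hp
    by_cases hf : Mtch r f = true
    · refine Or.inr ⟨f, ?_, List.mem_cons_self, hf, ?_⟩
      · simp [loopA_cons, hf]
      · intro g hg _
        rcases List.mem_cons.mp hg with rfl | hg
        · exact le_refl _
        · exact hp.1 g hg
    · have hf' : Mtch r f = false := by revert hf; cases h : Mtch r f <;> simp
      have hstep : loopA r (f :: t) = loopA r t := by
        simp [loopA_cons, hf']
      rcases ih hp.2 with ⟨h0, hn⟩ | ⟨m, h0, hmem, hm, hmax⟩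
      · refine Or.inl ⟨hstep ▸ h0, ?_⟩
        intro g hg
        rcases List.mem_cons.mp hg with rfl | hg
        · exact hf'
        · exact hn g hg
      · refine Or.inr ⟨m, hstep ▸ h0, List.mem_cons_of_mem _ hmem, hm, ?_⟩
        intro g hg hgm
        rcases List.mem_cons.mp hg with rfl | hg
        · exact absurd hgm hf
        · exact hmax g hg hgm

theorem foldB_inv (r : String) (l : List String) : ∀ (b : Option String),
    (∀ m, b = some m → Mtch r m = true) →
    (∀ m, l.foldl (stepB r) b = some m → Mtch r m = true ∧ (b = some m ∨ m ∈ l)) ∧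
    (∀ g ∈ l, Mtch r g = true →
      ∃ m, l.foldl (stepB r) b = some m ∧ PySem.Str.len g ≤ PySem.Str.len m) ∧
    (∀ m0, b = some m0 →
      ∃ m, l.foldl (stepB r) b = some m ∧ PySem.Str.len m0 ≤ PySem.Str.len m) := by
  induction l with
  | nil => exact fun b hb => ⟨fun m hm => ⟨hb m hm, Or.inl hm⟩, by simp, fun m0 h => ⟨m0, h, le_refl _⟩⟩
  | cons f t ih =>
    intro b hb
    have hstep : ∀ m, stepB r b f = some m → Mtch r m = true := by
      intro m hm
      rw [stepB_eq] at hm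
      cases hc : Mtch r f with
      | true =>
        rw [hc, if_pos rfl] at hm
        cases b with
        | none => injection hm with h; exact h ▸ hc
        | some b' =>
          have hm' : (if PySem.Str.len b' < PySem.Str.len f then some f else some b') = some m := hm
          by_cases hlt : PySem.Str.len b' < PySem.Str.len f
          · rw [if_pos hlt] at hm'; injection hm' with h; exact h ▸ hc
          · rw [if_neg hlt] at hm'; exact hb m hm'
      | false => rw [hc, if_neg (by decide)] at hm; exact hb m hm
    have hsome : ∀ m, stepB r b f = some m → (b = some m ∨ m = f) := by
      intro m hm
      rw [stepB_eq] at hm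
      cases hc : Mtch r f with
      | true =>
        rw [hc, if_pos rfl] at hm
        cases b with
        | none => injection hm with h; exact Or.inr h.symm
        | some b' =>
          have hm' : (if PySem.Str.len b' < PySem.Str.len f then some f else some b') = some m := hm
          by_cases hlt : PySem.Str.len b' < PySem.Str.len f
          · rw [if_pos hlt] at hm'; injection hm' with h; exact Or.inr h.symm
          · rw [if_neg hlt] at hm'; exact Or.inl hm'
      | false => rw [hc, if_neg (by decide)] at hm; exact Or.inl hm
    have hkeep : ∀ m0, b = some m0 →
        ∃ m, stepB r b f = some m ∧ PySem.Str.len m0 ≤ PySem.Str.len m := by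
      intro m0 h0
      subst h0
      cases hc : Mtch r f with
      | true =>
        by_cases hlt : PySem.Str.len m0 < PySem.Str.len f
        · refine ⟨f, ?_, le_of_lt hlt⟩
          rw [stepB_eq, hc, if_pos rfl]
          show (if PySem.Str.len m0 < PySem.Str.len f then some f else some m0) = some f
          rw [if_pos hlt]
        · refine ⟨m0, ?_, le_refl _⟩
          rw [stepB_eq, hc, if_pos rfl]
          show (if PySem.Str.len m0 < PySem.Str.len f then some f else some m0) = some m0
          rw [if_neg hlt]
      | false => exact ⟨m0, by rw [stepB_eq, hc, if_neg (by decide)], le_refl _⟩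
    have hfm : Mtch r f = true →
        ∃ m, stepB r b f = some m ∧ PySem.Str.len f ≤ PySem.Str.len m := by
      intro hf
      cases b with
      | none => exact ⟨f, by rw [stepB_eq, hf, if_pos rfl], le_refl _⟩
      | some b' =>
        by_cases hlt : PySem.Str.len b' < PySem.Str.len f
        · refine ⟨f, ?_, le_refl _⟩
          rw [stepB_eq, hf, if_pos rfl]
          show (if PySem.Str.len b' < PySem.Str.len f then some f else some b') = some f
          rw [if_pos hlt]
        · refine ⟨b', ?_, le_of_not_gt hlt⟩
          rw [stepB_eq, hf, if_pos rfl]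
          show (if PySem.Str.len b' < PySem.Str.len f then some f else some b') = some b'
          rw [if_neg hlt]
    obtain ⟨ih1, ih2, ih3⟩ := ih (stepB r b f) hstep
    refine ⟨?_, ?_, ?_⟩
    · intro m hm
      obtain ⟨h1, h2⟩ := ih1 m (by simpa using hm)
      refine ⟨h1, ?_⟩
      rcases h2 with h2 | h2
      · rcases hsome m h2 with h3 | h3
        · exact Or.inl h3
        · exact Or.inr (h3 ▸ List.mem_cons_self)
      · exact Or.inr (List.mem_cons_of_mem _ h2)
    · intro g hg hgm
      rcases List.mem_cons.mp hg with rfl | hg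
      · obtain ⟨m, hm, hle⟩ := hfm hgm
        obtain ⟨m', hm', hle'⟩ := ih3 m hm
        exact ⟨m', by simpa using hm', le_trans hle hle'⟩
      · obtain ⟨m, hm, hle⟩ := ih2 g hg hgm
        exact ⟨m, by simpa using hm, hle⟩
    · intro m0 h0
      obtain ⟨m, hm, hle⟩ := hkeep m0 h0
      obtain ⟨m', hm', hle'⟩ := ih3 m hm
      exact ⟨m', by simpa using hm', le_trans hle hle'⟩

theorem foldB_good (r : String) (cats : List String) :
    Good r cats (cats.foldl (stepB r) none) := by
  obtain ⟨h1, h2, _⟩ := foldB_inv r cats none (by simp)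
  cases hres : cats.foldl (stepB r) none with
  | none =>
    refine Or.inl ⟨rfl, fun g hg => ?_⟩
    by_contra hgm
    obtain ⟨m, hm, _⟩ := h2 g hg (by simpa using hgm)
    rw [hres] at hm; cases hm
  | some m =>
    obtain ⟨hm1, hm2⟩ := h1 m hres
    refine Or.inr ⟨m, rfl, ?_, hm1, fun g hg hgm => ?_⟩
    · rcases hm2 with h | h
      · cases h
      · exact h
    · obtain ⟨m', hm', hle⟩ := h2 g hg hgm
      rw [hres] at hm'; cases hm'; exact hle

-- A's sorted-first-match equals B's running-longest-match
theorem loop_eq_fold (r : String) (cats : List String) :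
    loopA r (PySem.List.sorted cats (fun f => PySem.Str.len f) true) = cats.foldl (stepB r) none := by
  have hA := loopA_good r (PySem.List.sorted cats (fun f => PySem.Str.len f) true)
    (PySem.List.sorted_pairwise_rev cats (fun f => PySem.Str.len f))
  have hA' : Good r cats (loopA r (PySem.List.sorted cats (fun f => PySem.Str.len f) true)) := by
    rcases hA with ⟨h0, hn⟩ | ⟨m, h0, hmem, hm, hmax⟩
    · exact Or.inl ⟨h0, fun g hg => hn g ((PySem.List.mem_sorted _ _ _ _).mpr hg)⟩
    · exact Or.inr ⟨m, h0, (PySem.List.mem_sorted _ _ _ _).mp hmem, hm,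
        fun g hg hgm => hmax g ((PySem.List.mem_sorted _ _ _ _).mpr hg) hgm⟩
  exact good_uniq hA' (foldB_good r cats)

-- split('__', 1) on a list whose first '__' is at position 3
theorem goSplit_zero (sep : List Char) (fuel : Nat) (l cur : List Char) (acc : List (List Char)) :
    PySem.Chars.splitOnMax.go sep fuel 0 l cur acc = ((cur.reverse ++ l) :: acc).reverse := by
  cases fuel with
  | zero => simp [PySem.Chars.splitOnMax.go]
  | succ f => cases l <;> simp [PySem.Chars.splitOnMax.go]

theorem splitTail (a b c : Char) (rest : List Char)
    (ha : a ≠ '_') (hb : b ≠ '_') (hc : c ≠ '_') :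
    PySem.Chars.splitOnMax (a :: b :: c :: '_' :: '_' :: rest) ['_', '_'] 1 = [[a, b, c], rest] := by
  simp [PySem.Chars.splitOnMax]
  show PySem.Chars.splitOnMax.go _ (rest.length + 6) 1 _ _ _ = _
  simp [PySem.Chars.splitOnMax.go, goSplit_zero, List.isPrefixOf, Ne.symm ha, Ne.symm hb, Ne.symm hc]

-- A's name.split('__', 1)[1] equals B's name[5:] when name starts 'xyz__' with x,y,z ≠ '_'
theorem pyTail_eq_slice (name : String) (a b c : Char) (rest : List Char)
    (h : name.toList = a :: b :: c :: '_' :: '_' :: rest)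
    (ha : a ≠ '_') (hb : b ≠ '_') (hc : c ≠ '_') :
    pyTailA name = PySem.Str.slice name (some 5) none := by
  apply String.toList_inj.mp
  have h1 : PySem.Str.splitMax? name "__" 1 =
      some (((PySem.Chars.splitOnMax name.toList ['_', '_'] 1)).map String.ofList) := by
    simp [PySem.Str.splitMax?, PySem.Chars.splitMax?]
  rw [pyTailA, h1]
  rw [h, splitTail a b c rest ha hb hc]
  rw [PySem.Str.slice]
  simp [PySem.List.pyGet?, PySem.List.pyIdx?, h, PySem.Chars.slice]
  rw [PySem.List.slice_from _ (show (0:Int) ≤ 5 by norm_num)]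
  rfl

-- destructure name.toList from startswith
theorem startswith_decomp (name pre : String) (h : PySem.Str.startswith name pre = true) :
    ∃ rest, name.toList = pre.toList ++ rest := by
  rw [PySem.Str.startswith_eq, PySem.Chars.startswith_iff] at h
  obtain ⟨rest, hrest⟩ := h
  exact ⟨rest, hrest.symm⟩

-- ===== VERDICT (by name: the statement is the Claim_ definition above) =====
theorem source_feature_from_encoded_spec : Claim_equal_source_feature_from_encoded := by
  intro name cats _dom
  unfold Spec_source_feature_from_encoded source_feature_from_encoded source_feature_from_encoded_alt
  by_cases h1 : PySem.Str.startswith name "num__" = true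
  · obtain ⟨rest, hrest⟩ := startswith_decomp name "num__" h1
    simp only [h1, if_true]
    exact pyTail_eq_slice name 'n' 'u' 'm' rest (by simpa using hrest)
      (by decide) (by decide) (by decide)
  · by_cases h2 : PySem.Str.startswith name "cat__" = true
    · obtain ⟨rest, hrest⟩ := startswith_decomp name "cat__" h2
      have htail : pyTailA name = PySem.Str.slice name (some 5) none :=
        pyTail_eq_slice name 'c' 'a' 't' rest (by simpa using hrest)
          (by decide) (by decide) (by decide)
      simp only [h1, h2, if_false, if_true, Bool.not_true, Bool.false_eq_true]
      rw [htail, loop_eq_fold]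
      cases cats.foldl (stepB (PySem.Str.slice name (some 5) none)) none with
      | none => rfl
      | some f => rfl
    · have h1' : PySem.Str.startswith name "num__" = false := Bool.not_eq_true _ ▸ h1
      have h2' : PySem.Str.startswith name "cat__" = false := Bool.not_eq_true _ ▸ h2
      simp only [h1', h2']
      simp
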